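-- pv_equiv track=rewrite | github.com/asgeir/old-school-projects | python/verkefni3/css.py | css_properties
-- ===== SOURCE A (Python) =====
-- def css_properties(css):
--     css = css.replace('\n', '').replace('\r', '')
--
--     stage1 = css.split('{')[1:]
--     stage2 = [x.split('}')[0] for x in stage1]
--     stage3 = [[y.strip() for y in x.split(';') if y.strip()] for x in stage2]
--     stage4 = [[y.split(':') for y in x] for x in stage3]
--     stage5 = [[tuple([z.strip() for z in y]) for y in x] for x in stage4]
--
--     acc = []
--     for each in stage5:
--         acc += each
--
--     return acc
-- ===== SOURCE B (Python) =====
-- def _flush(buf, result):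
--     decl = ''.join(buf).strip()
--     buf.clear()
--     if decl:
--         result.append(tuple(part.strip() for part in decl.split(':')))
--
--
-- def css_properties(css):
--     # One pass over the characters with an explicit scanner state instead of
--     # A's staged split pipeline.
--     result = []
--     in_block = False
--     buf = []
--     for ch in css.replace('\n', '').replace('\r', ''):
--         if ch == '{':
--             if in_block:
--                 _flush(buf, result)
--             in_block = True
--         elif not in_block:
--             pass
--         elif ch == '}':
--             _flush(buf, result)
--             in_block = False
--         elif ch == ';':
--             _flush(buf, result)
--         else:
--             buf.append(ch)
--     if in_block:
--         _flush(buf, result)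
--     return result
-- ===== Notes on version B (the rewrite author's own statement) =====
-- stated objective: alternative
-- what changed: Replaces A's five staged split-pipeline passes with a single character-level scanner that walks the string once, tracking an in-block flag and a declaration buffer and flushing each complete declaration (stripped and split on ':') directly into the result.
import Mathlib
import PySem

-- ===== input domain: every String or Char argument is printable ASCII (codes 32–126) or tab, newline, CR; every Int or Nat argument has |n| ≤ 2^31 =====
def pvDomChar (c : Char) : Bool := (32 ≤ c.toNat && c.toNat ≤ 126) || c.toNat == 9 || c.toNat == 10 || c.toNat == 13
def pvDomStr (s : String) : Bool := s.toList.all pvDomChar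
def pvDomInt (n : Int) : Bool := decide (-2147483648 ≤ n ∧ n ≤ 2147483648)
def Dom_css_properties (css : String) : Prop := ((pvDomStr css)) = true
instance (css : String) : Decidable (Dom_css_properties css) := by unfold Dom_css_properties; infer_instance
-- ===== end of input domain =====

-- B replaces A's staged split pipeline by a single character-level scanner with an
-- explicit in-block state and a declaration buffer (objective: alternative).

-- ===== PORT A =====
def css_properties (css : String) : List (List String) :=
  let cs := PySem.Chars.replace (PySem.Chars.replace css.toList ['\n'] []) ['\r'] []
  let stage1 := PySem.List.slice (PySem.Chars.splitOn cs ['{']) (some 1) none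
  let stage2 := stage1.map (fun x => PySem.List.pyGetD (PySem.Chars.splitOn x ['}']) 0 [])
  let stage3 := stage2.map (fun x =>
    ((PySem.Chars.splitOn x [';']).filter (fun y => !(PySem.Chars.strip y).isEmpty)).map
      PySem.Chars.strip)
  let stage4 := stage3.map (fun x => x.map (fun y => PySem.Chars.splitOn y [':']))
  let stage5 := stage4.map (fun x => x.map (fun y => y.map (fun z => String.ofList (PySem.Chars.strip z))))
  stage5.foldl (fun acc each => acc ++ each) []

-- ===== PORT B =====
-- _flush of Source B: strip the buffered declaration; if nonempty, emit its ':'-parts stripped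
def pvFlush (buf : List Char) : List (List String) :=
  let decl := PySem.Chars.strip buf
  if decl.isEmpty then []
  else [(PySem.Chars.splitOn decl [':']).map (fun part => String.ofList (PySem.Chars.strip part))]

-- one loop iteration of Source B's scanner: state = (in_block, buf, result)
def pvStep (st : Bool × List Char × List (List String)) (ch : Char) :
    Bool × List Char × List (List String) :=
  let (inBlock, buf, result) := st
  if ch = '{' then (true, [], if inBlock then result ++ pvFlush buf else result)
  else if !inBlock then st
  else if ch = '}' then (false, [], result ++ pvFlush buf)
  else if ch = ';' then (true, [], result ++ pvFlush buf)
  else (true, buf ++ [ch], result)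

def css_properties_alt (css : String) : List (List String) :=
  let text := PySem.Chars.replace (PySem.Chars.replace css.toList ['\n'] []) ['\r'] []
  let (inBlock, buf, result) := text.foldl pvStep (false, [], [])
  if inBlock then result ++ pvFlush buf else result

-- ===== PRECONDITION & SPEC =====
def Spec_css_properties (css : String) (out : List (List String)) : Prop := out = css_properties_alt css
instance (css : String) (out : List (List String)) : Decidable (Spec_css_properties css out) := by unfold Spec_css_properties; infer_instance

-- ===== CLAIM (what is proved, stated in full; the proofs are below) =====
def Claim_equal_css_properties : Prop := ∀ (css : String), Dom_css_properties css → Spec_css_properties css (css_properties css)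

-- ===== LEMMAS AND PROOFS =====

-- splitOn characterization ---------------------------------------------------

lemma pvGo_spec (sep : List Char) (hsep : sep ≠ []) :
    ∀ n l, l.length ≤ n → ∀ fuel, l.length ≤ fuel → ∀ cur acc,
      PySem.Chars.splitOn.go sep fuel l cur acc
        = acc.reverse ++ (PySem.Chars.splitOn l sep).modifyHead (cur.reverse ++ ·) := by
  have hlen : 1 ≤ sep.length := by
    cases sep with
    | nil => exact absurd rfl hsep
    | cons a t => simp
  intro n
  induction n with
  | zero =>
    intro l hl fuel _ cur acc
    have : l = [] := List.eq_nil_of_length_eq_zero (Nat.le_zero.mp hl)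
    subst this
    cases fuel <;> rw [PySem.Chars.splitOn.go] <;>
      simp [PySem.Chars.splitOn, PySem.Chars.splitOn.go]
  | succ n ih =>
    intro l hl fuel hf cur acc
    cases l with
    | nil =>
      cases fuel <;> rw [PySem.Chars.splitOn.go] <;>
        simp [PySem.Chars.splitOn, PySem.Chars.splitOn.go]
    | cons c rest =>
      cases fuel with
      | zero => simp at hf
      | succ fuel =>
        rw [PySem.Chars.splitOn.go]
        have hrhs : PySem.Chars.splitOn (c :: rest) sep
            = PySem.Chars.splitOn.go sep ((c :: rest).length + 1) (c :: rest) [] [] := rfl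
        by_cases hp : sep.isPrefixOf (c :: rest)
        · have hdl : (List.drop sep.length (c :: rest)).length ≤ n := by
            simp only [List.length_drop, List.length_cons] at *; omega
          have hdf : (List.drop sep.length (c :: rest)).length ≤ fuel := by
            simp only [List.length_drop, List.length_cons] at *; omega
          have hdf2 : (List.drop sep.length (c :: rest)).length ≤ (c :: rest).length := by
            simp
          rw [hp, if_pos rfl, ih _ hdl fuel hdf]
          rw [hrhs, PySem.Chars.splitOn.go, hp, if_pos rfl, ih _ hdl _ hdf2]
          simp [List.modifyHead]
        · have hrl : rest.length ≤ n := by simp at hl; omega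
          have hrf : rest.length ≤ fuel := by simp at hf; omega
          rw [if_neg (by simpa using hp), ih _ hrl fuel hrf]
          rw [hrhs, PySem.Chars.splitOn.go, if_neg (by simpa using hp),
            ih _ hrl _ (by simp)]
          simp
          cases PySem.Chars.splitOn rest sep <;> simp

lemma pvSplitOn_cons_eq (d : Char) (l : List Char) :
    PySem.Chars.splitOn (d :: l) [d] = [] :: PySem.Chars.splitOn l [d] := by
  have h1 : PySem.Chars.splitOn (d :: l) [d]
      = PySem.Chars.splitOn.go [d] ((d :: l).length + 1) (d :: l) [] [] := rfl
  rw [h1, PySem.Chars.splitOn.go]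
  have hp : ([d]).isPrefixOf (d :: l) = true := by simp [List.isPrefixOf]
  rw [hp, if_pos rfl]
  rw [pvGo_spec [d] (by simp) l.length _ (by simp) _ (by simp)]
  simp [List.modifyHead]
  cases PySem.Chars.splitOn l [d] <;> simp

lemma pvSplitOn_cons_ne (c d : Char) (l : List Char) (h : c ≠ d) :
    PySem.Chars.splitOn (c :: l) [d] = (PySem.Chars.splitOn l [d]).modifyHead (c :: ·) := by
  have h1 : PySem.Chars.splitOn (c :: l) [d]
      = PySem.Chars.splitOn.go [d] ((c :: l).length + 1) (c :: l) [] [] := rfl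
  rw [h1, PySem.Chars.splitOn.go]
  have hp : ([d]).isPrefixOf (c :: l) = false := by
    simpa [List.isPrefixOf] using (Ne.symm h)
  rw [hp]
  simp only [Bool.false_eq_true, if_false]
  rw [pvGo_spec [d] (by simp) l.length _ (by simp) _ (by simp)]
  cases PySem.Chars.splitOn l [d] <;> simp

lemma pvSplitOn_nil' (sep : List Char) : PySem.Chars.splitOn [] sep = [[]] := by
  unfold PySem.Chars.splitOn
  rw [PySem.Chars.splitOn.go] <;> simp

lemma pvSplitOn_ne_nil (l : List Char) (d : Char) :
    PySem.Chars.splitOn l [d] ≠ [] := by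
  induction l with
  | nil => rw [pvSplitOn_nil']; simp
  | cons c rest ih =>
    by_cases h : c = d
    · subst h; rw [pvSplitOn_cons_eq]; simp
    · rw [pvSplitOn_cons_ne c d rest h]
      cases hx : PySem.Chars.splitOn rest [d] with
      | nil => exact absurd hx ih
      | cons a t => simp

-- scanner spec ----------------------------------------------------------------

-- proof-side recursive form of Source B's scanner loop
def pvScan : Bool → List Char → List Char → List (List String)
  | mode, buf, [] => if mode then pvFlush buf else []
  | mode, buf, c :: l =>
    if c = '{' then (if mode then pvFlush buf else []) ++ pvScan true [] l
    else if !mode then pvScan false buf l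
    else if c = '}' then pvFlush buf ++ pvScan false [] l
    else if c = ';' then pvFlush buf ++ pvScan true [] l
    else pvScan true (buf ++ [c]) l

lemma pvFoldl_scan (l : List Char) :
    ∀ mode buf result,
      (let (m, b, r) := l.foldl pvStep (mode, buf, result)
       if m then r ++ pvFlush b else r) = result ++ pvScan mode buf l := by
  induction l with
  | nil => intro mode buf result; cases mode <;> simp [pvScan]
  | cons c l ih =>
    intro mode buf result
    simp only [List.foldl_cons]
    by_cases h1 : c = '{'
    · subst h1
      cases mode <;> simp [pvStep, pvScan, ih, List.append_assoc]
    · cases mode with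
      | false => simp [pvStep, pvScan, h1, ih]
      | true =>
        by_cases h2 : c = '}'
        · subst h2; simp [pvStep, pvScan, ih, List.append_assoc]
        · by_cases h3 : c = ';'
          · subst h3; simp [pvStep, pvScan, h1, ih, List.append_assoc]
          · simp [pvStep, pvScan, h1, h2, h3, ih]

-- pipeline spec ---------------------------------------------------------------

def pvBlockOut (b : List Char) : List (List String) :=
  (PySem.Chars.splitOn (PySem.List.pyGetD (PySem.Chars.splitOn b ['}']) 0 []) [';']).flatMap pvFlush

def pvContent (l : List Char) : List Char :=
  PySem.List.pyGetD
    (PySem.Chars.splitOn (PySem.List.pyGetD (PySem.Chars.splitOn l ['{']) 0 []) ['}']) 0 []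

def pvRest (l : List Char) : List (List String) :=
  ((PySem.Chars.splitOn l ['{']).drop 1).flatMap pvBlockOut

lemma pvDrop_modifyHead {α : Type} (f : α → α) (X : List α) :
    (X.modifyHead f).drop 1 = X.drop 1 := by
  cases X <;> simp

lemma pvHead_splitOn (l : List Char) (d : Char) :
    ∃ h t, PySem.Chars.splitOn l [d] = h :: t := by
  cases hx : PySem.Chars.splitOn l [d] with
  | nil => exact absurd hx (pvSplitOn_ne_nil l d)
  | cons a t => exact ⟨a, t, rfl⟩

lemma pvSplitOn_append (buf r : List Char) (hb : ';' ∉ buf) :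
    PySem.Chars.splitOn (buf ++ r) [';']
      = (PySem.Chars.splitOn r [';']).modifyHead (buf ++ ·) := by
  induction buf with
  | nil => cases hx : PySem.Chars.splitOn r [';'] with
    | nil => simp [hx]
    | cons a t => simp [hx]
  | cons c buf ih =>
    have hc : c ≠ ';' := by intro h; exact hb (h ▸ List.mem_cons_self ..)
    have hb' : ';' ∉ buf := fun h => hb (List.mem_cons_of_mem _ h)
    rw [List.cons_append, pvSplitOn_cons_ne c ';' _ hc, ih hb']
    obtain ⟨h, t, hx⟩ := pvHead_splitOn r ';'
    rw [hx]; simp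

lemma pvSplitOn_noSep (buf : List Char) (hb : ';' ∉ buf) :
    PySem.Chars.splitOn buf [';'] = [buf] := by
  have h := pvSplitOn_append buf [] hb
  rw [List.append_nil, pvSplitOn_nil'] at h
  simpa using h

-- pvContent on a cons
lemma pvContent_nil : pvContent [] = [] := by decide

lemma pvContent_lbrace (l : List Char) : pvContent ('{' :: l) = [] := by
  unfold pvContent
  rw [pvSplitOn_cons_eq]
  simp [PySem.List.pyGetD_zero, pvSplitOn_nil']

lemma pvContent_rbrace (l : List Char) : pvContent ('}' :: l) = [] := by
  unfold pvContent
  rw [pvSplitOn_cons_ne '}' '{' l (by decide)]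
  obtain ⟨h, t, hx⟩ := pvHead_splitOn l '{'
  rw [hx]
  simp only [List.modifyHead_cons, PySem.List.pyGetD_zero, List.getD_cons_zero]
  rw [pvSplitOn_cons_eq]
  simp

lemma pvContent_other (c : Char) (l : List Char) (h1 : c ≠ '{') (h2 : c ≠ '}') :
    pvContent (c :: l) = c :: pvContent l := by
  unfold pvContent
  rw [pvSplitOn_cons_ne c '{' l h1]
  obtain ⟨h, t, hx⟩ := pvHead_splitOn l '{'
  rw [hx]
  simp only [List.modifyHead_cons, PySem.List.pyGetD_zero, List.getD_cons_zero]
  rw [pvSplitOn_cons_ne c '}' h h2]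
  obtain ⟨h', t', hx'⟩ := pvHead_splitOn h '}'
  rw [hx']
  simp

-- pvRest on a cons
lemma pvRest_nil : pvRest [] = [] := by decide

lemma pvRest_lbrace (l : List Char) :
    pvRest ('{' :: l)
      = (PySem.Chars.splitOn (pvContent l) [';']).flatMap pvFlush ++ pvRest l := by
  unfold pvRest
  rw [pvSplitOn_cons_eq]
  obtain ⟨h, t, hx⟩ := pvHead_splitOn l '{'
  rw [hx]
  simp only [List.drop_succ_cons, List.drop_zero, List.flatMap_cons]
  congr 1
  unfold pvBlockOut pvContent
  rw [hx]
  simp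

lemma pvRest_other (c : Char) (l : List Char) (h1 : c ≠ '{') :
    pvRest (c :: l) = pvRest l := by
  unfold pvRest
  rw [pvSplitOn_cons_ne c '{' l h1, pvDrop_modifyHead]

-- the scanner computes A's pipeline
lemma pvScan_pipeline (l : List Char) :
    (∀ buf, pvScan false buf l = pvRest l)
    ∧ (∀ buf, ';' ∉ buf →
        pvScan true buf l
          = (PySem.Chars.splitOn (buf ++ pvContent l) [';']).flatMap pvFlush ++ pvRest l) := by
  induction l with
  | nil =>
    constructor
    · intro buf; simp [pvScan, pvRest_nil]
    · intro buf hb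
      simp [pvScan, pvContent_nil, pvRest_nil, pvSplitOn_noSep buf hb]
  | cons c l ih =>
    obtain ⟨ihP, ihQ⟩ := ih
    constructor
    · intro buf
      by_cases h1 : c = '{'
      · subst h1
        rw [show pvScan false buf ('{' :: l) = pvScan true [] l from by simp [pvScan],
          ihQ [] (by simp), pvRest_lbrace]
        simp
      · rw [show pvScan false buf (c :: l) = pvScan false buf l from by simp [pvScan, h1],
          ihP buf, pvRest_other c l h1]
    · intro buf hb
      by_cases h1 : c = '{'
      · subst h1
        rw [show pvScan true buf ('{' :: l) = pvFlush buf ++ pvScan true [] l from by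
            simp [pvScan],
          ihQ [] (by simp), pvContent_lbrace, List.append_nil, pvSplitOn_noSep buf hb,
          pvRest_lbrace]
        simp
      · by_cases h2 : c = '}'
        · subst h2
          rw [show pvScan true buf ('}' :: l) = pvFlush buf ++ pvScan false [] l from by
              simp [pvScan, h1],
            ihP [], pvContent_rbrace, List.append_nil, pvSplitOn_noSep buf hb,
            pvRest_other '}' l h1]
          simp
        · by_cases h3 : c = ';'
          · subst h3
            rw [show pvScan true buf (';' :: l) = pvFlush buf ++ pvScan true [] l from by
                simp [pvScan, h1, h2],
              ihQ [] (by simp), pvContent_other ';' l h1 h2,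
              pvSplitOn_append buf (';' :: pvContent l) hb, pvSplitOn_cons_eq,
              pvRest_other ';' l h1]
            simp
          · rw [show pvScan true buf (c :: l) = pvScan true (buf ++ [c]) l from by
                simp [pvScan, h1, h2, h3],
              ihQ (buf ++ [c]) (by
                intro hm
                rcases List.mem_append.mp hm with h | h
                · exact hb h
                · simp at h; exact h3 h.symm),
              pvContent_other c l h1 h2, pvRest_other c l h1, List.append_assoc]
            simp

-- A-side reshaping ------------------------------------------------------------

lemma pvFilterMap_flush (L : List (List Char)) :
    ((L.filter (fun y => !(PySem.Chars.strip y).isEmpty)).map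
        (fun y => (PySem.Chars.splitOn (PySem.Chars.strip y) [':']).map
          (fun z => String.ofList (PySem.Chars.strip z))))
      = L.flatMap pvFlush := by
  induction L with
  | nil => rfl
  | cons y L ih =>
    by_cases h : (PySem.Chars.strip y).isEmpty
    · simp [pvFlush, h, ih]
    · simp [pvFlush, h, ih]

lemma pvAB_eq (css : String) : css_properties css = css_properties_alt css := by
  have hB : css_properties_alt css
      = pvScan false [] (PySem.Chars.replace (PySem.Chars.replace css.toList ['\n'] []) ['\r'] []) := by
    have h := pvFoldl_scan (PySem.Chars.replace (PySem.Chars.replace css.toList ['\n'] []) ['\r'] [])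
      false [] []
    unfold css_properties_alt
    simpa using h
  have hA : css_properties css
      = pvRest (PySem.Chars.replace (PySem.Chars.replace css.toList ['\n'] []) ['\r'] []) := by
    unfold css_properties
    show (((PySem.List.slice
        (PySem.Chars.splitOn (PySem.Chars.replace (PySem.Chars.replace css.toList ['\n'] []) ['\r'] []) ['{'])
        (some 1) none).map (fun x => PySem.List.pyGetD (PySem.Chars.splitOn x ['}']) 0 [])
      |>.map (fun x =>
        ((PySem.Chars.splitOn x [';']).filter (fun y => !(PySem.Chars.strip y).isEmpty)).map
          PySem.Chars.strip)
      |>.map (fun x => x.map (fun y => PySem.Chars.splitOn y [':']))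
      |>.map (fun x => x.map (fun y => y.map (fun z => String.ofList (PySem.Chars.strip z)))))
      |>.foldl (fun acc each => acc ++ each) []) = _
    rw [PySem.List.slice_from _ (show (0:Int) ≤ 1 by norm_num)]
    simp only [List.map_map]
    rw [show (fun (acc each : List (List String)) => acc ++ each) = fun acc x => acc ++ id x from rfl,
      PySem.List.foldl_append_eq_flatMap]
    simp only [List.nil_append, List.flatMap_map]
    unfold pvRest
    norm_num
    congr 1
    funext x
    unfold pvBlockOut
    rw [← pvFilterMap_flush]
    simp [Function.comp]
  rw [hA, hB, (pvScan_pipeline _).1]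

-- ===== VERDICT (by name: the statement is the Claim_ definition above) =====
theorem css_properties_spec : Claim_equal_css_properties := by
  intro css _
  exact pvAB_eq css
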